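-- pv_equiv track=rewrite | github.com/vincen-tho/Pyhton-Compiler | lexer.py | seperate_special_character
-- ===== SOURCE A (Python) =====
-- def seperate_special_character(input_file):
--     # Fungsi yang akan mengembalikan special char menjadi sebuah string terpisah
--     # dari string awal
--     input_list = []
--     for line in input_file:
--         line = line.replace('(', ' ( ')
--         line = line.replace(')', ' ) ')
--         line = line.replace('+', ' + ')
--         line = line.replace('-', ' - ')
--         line = line.replace('*', ' * ')
--         line = line.replace('/', ' / ')
--         line = line.replace('%', ' % ')
--         line = line.replace(',', ' , ')
--         line = line.replace('.', ' . ')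
--         line = line.replace('>', ' > ')
--         line = line.replace('<', ' < ')
--         line = line.replace('[', ' [ ')
--         line = line.replace(']', ' ] ')
--         line = line.replace('"', ' " ')
--         line = line.replace("'", " ' ")
--         line = line.replace('=', ' = ')
--         line = line.replace(':', ' : ')
--         line = line.split()
--         # line.append('EOL')
--         input_list.append(line)
--     return input_list
-- ===== SOURCE B (Python) =====
-- SPECIALS = frozenset('()+-*/%,.<>[]"\'=:')
--
-- def seperate_special_character(input_file):
--     # Single char-level pass per line: buffer ordinary chars, emit specials as
--     # their own tokens, flush the buffer on whitespace.
--     result = []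
--     for line in input_file:
--         tokens = []
--         buf = ''
--         for ch in line:
--             if ch in SPECIALS:
--                 if buf:
--                     tokens.append(buf)
--                     buf = ''
--                 tokens.append(ch)
--             elif ch.isspace():
--                 if buf:
--                     tokens.append(buf)
--                     buf = ''
--             else:
--                 buf += ch
--         if buf:
--             tokens.append(buf)
--         result.append(tokens)
--     return result
-- ===== Notes on version B (the rewrite author's own statement) =====
-- stated objective: alternative
-- what changed: Replaced A's 17 whole-string replace passes followed by split() with a single character-level pass per line that buffers ordinary characters, emits each special character as its own token and flushes the buffer on whitespace.
import Mathlib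
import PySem

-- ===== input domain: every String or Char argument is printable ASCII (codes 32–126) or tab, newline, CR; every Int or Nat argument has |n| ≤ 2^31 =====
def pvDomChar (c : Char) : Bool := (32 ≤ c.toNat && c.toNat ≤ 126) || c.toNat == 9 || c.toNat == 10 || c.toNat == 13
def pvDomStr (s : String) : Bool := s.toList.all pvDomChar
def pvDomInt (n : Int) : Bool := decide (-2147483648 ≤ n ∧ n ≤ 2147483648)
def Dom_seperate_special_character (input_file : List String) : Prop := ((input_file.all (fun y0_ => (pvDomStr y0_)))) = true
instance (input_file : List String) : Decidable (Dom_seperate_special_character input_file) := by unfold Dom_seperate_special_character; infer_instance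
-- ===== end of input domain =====

-- B replaces A's 17 whole-string replace passes + split by one char-level tokenizing pass per line (objective: alternative decomposition).

-- ===== PORT A =====
-- body of A's loop: 17 replaces, then .split()
def pvProcessA (line : String) : List String :=
  let line := PySem.Str.replace line "(" " ( "
  let line := PySem.Str.replace line ")" " ) "
  let line := PySem.Str.replace line "+" " + "
  let line := PySem.Str.replace line "-" " - "
  let line := PySem.Str.replace line "*" " * "
  let line := PySem.Str.replace line "/" " / "
  let line := PySem.Str.replace line "%" " % "
  let line := PySem.Str.replace line "," " , "
  let line := PySem.Str.replace line "." " . "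
  let line := PySem.Str.replace line ">" " > "
  let line := PySem.Str.replace line "<" " < "
  let line := PySem.Str.replace line "[" " [ "
  let line := PySem.Str.replace line "]" " ] "
  let line := PySem.Str.replace line "\"" " \" "
  let line := PySem.Str.replace line "'" " ' "
  let line := PySem.Str.replace line "=" " = "
  let line := PySem.Str.replace line ":" " : "
  PySem.Str.split₀ line

def seperate_special_character (input_file : List String) : List (List String) :=
  input_file.foldl (fun input_list line => input_list ++ [pvProcessA line]) []

-- ===== PORT B =====
-- SPECIALS = frozenset('()+-*/%,.<>[]"\'=:')
def pvSPECIALS : PySem.Set Char :=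
  PySem.Set.ofList ['(', ')', '+', '-', '*', '/', '%', ',', '.', '<', '>', '[', ']', '"', '\'', '=', ':']

-- body of B's inner loop over the characters of a line; state = (tokens, buf)
def pvStepB (st : List String × List Char) (ch : Char) : List String × List Char :=
  if pvSPECIALS.contains ch then
    ((if st.2.isEmpty then st.1 else st.1 ++ [String.ofList st.2]) ++ [String.ofList [ch]], [])
  else if PySem.Chars.isspace ch then
    (if st.2.isEmpty then st.1 else st.1 ++ [String.ofList st.2], [])
  else
    (st.1, st.2 ++ [ch])

-- one line: run the char loop, then flush the remaining buffer
def pvLineB (line : String) : List String :=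
  let st := line.toList.foldl pvStepB ([], [])
  if st.2.isEmpty then st.1 else st.1 ++ [String.ofList st.2]

def seperate_special_character_alt (input_file : List String) : List (List String) :=
  input_file.foldl (fun result line => result ++ [pvLineB line]) []

-- ===== PRECONDITION & SPEC =====
def Spec_seperate_special_character (input_file : List String) (out : List (List String)) : Prop := out = seperate_special_character_alt input_file
instance (input_file : List String) (out : List (List String)) : Decidable (Spec_seperate_special_character input_file out) := by unfold Spec_seperate_special_character; infer_instance

-- ===== CLAIM (what is proved, stated in full; the proofs are below) =====
def Claim_equal_seperate_special_character : Prop := ∀ (input_file : List String), Dom_seperate_special_character input_file → Spec_seperate_special_character input_file (seperate_special_character input_file)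

-- ===== LEMMAS AND PROOFS =====

-- padding function: what the replace chain does to a single character
def pvPad (x : Char) : List Char := if pvSPECIALS.contains x then [' ', x, ' '] else [x]

-- reference tokenizer on char lists (buf = current token so far, in order)
def pvTok : List Char → List Char → List (List Char)
  | [], buf => if buf.isEmpty then [] else [buf]
  | c :: t, buf =>
    if pvSPECIALS.contains c then
      (if buf.isEmpty then [] else [buf]) ++ [c] :: pvTok t []
    else if PySem.Chars.isspace c then
      (if buf.isEmpty then [] else [buf]) ++ pvTok t []
    else
      pvTok t (buf ++ [c])

-- the A-side replace chain, on char lists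
def pvChain (s : List Char) : List Char :=
  let s := PySem.Chars.replace s ['('] [' ', '(', ' ']
  let s := PySem.Chars.replace s [')'] [' ', ')', ' ']
  let s := PySem.Chars.replace s ['+'] [' ', '+', ' ']
  let s := PySem.Chars.replace s ['-'] [' ', '-', ' ']
  let s := PySem.Chars.replace s ['*'] [' ', '*', ' ']
  let s := PySem.Chars.replace s ['/'] [' ', '/', ' ']
  let s := PySem.Chars.replace s ['%'] [' ', '%', ' ']
  let s := PySem.Chars.replace s [','] [' ', ',', ' ']
  let s := PySem.Chars.replace s ['.'] [' ', '.', ' ']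
  let s := PySem.Chars.replace s ['>'] [' ', '>', ' ']
  let s := PySem.Chars.replace s ['<'] [' ', '<', ' ']
  let s := PySem.Chars.replace s ['['] [' ', '[', ' ']
  let s := PySem.Chars.replace s [']'] [' ', ']', ' ']
  let s := PySem.Chars.replace s ['"'] [' ', '"', ' ']
  let s := PySem.Chars.replace s ['\''] [' ', '\'', ' ']
  let s := PySem.Chars.replace s ['='] [' ', '=', ' ']
  PySem.Chars.replace s [':'] [' ', ':', ' ']

-- replace with a single-char needle is a flatMap
lemma pv_go (c : Char) (r : List Char) :
    ∀ (l : List Char) (fuel : Nat) (acc : List Char), l.length ≤ fuel →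
      PySem.Chars.replace.go [c] r fuel l acc
        = acc.reverse ++ l.flatMap (fun x => if x = c then r else [x]) := by
  intro l
  induction l with
  | nil => intro fuel acc _; cases fuel <;> simp [PySem.Chars.replace.go]
  | cons c' t ih =>
    intro fuel acc h
    cases fuel with
    | zero => simp at h
    | succ f =>
      by_cases hc : c = c'
      · subst hc
        simp [PySem.Chars.replace.go, List.isPrefixOf, ih f _ (by simpa using h)]
      · have hcc : c' ≠ c := Ne.symm hc
        simp [PySem.Chars.replace.go, List.isPrefixOf, hc, hcc, ih f _ (by simpa using h)]

lemma pv_replace_single (c : Char) (r : List Char) (s : List Char) :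
    PySem.Chars.replace s [c] r = s.flatMap (fun x => if x = c then r else [x]) := by
  simp [PySem.Chars.replace, pv_go c r s s.length [] le_rfl]

-- a special character is not whitespace
lemma pv_spec_not_space {c : Char} (h : pvSPECIALS.contains c = true) :
    PySem.Chars.isspace c = false := by
  have hm : c ∈ ['(', ')', '+', '-', '*', '/', '%', ',', '.', '<', '>', '[', ']', '"', '\'', '=', ':'] := by
    have hm0 : c ∈ pvSPECIALS := by simpa using h
    simpa [pvSPECIALS, PySem.Set.mem_ofList] using hm0
  fin_cases hm <;> decide

-- the chain acts characterwise
lemma pv_chain_eq (s : List Char) : pvChain s = s.flatMap pvPad := by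
  induction s with
  | nil => rfl
  | cons x t ih =>
    have hsplit : pvChain (x :: t) = pvChain [x] ++ pvChain t := by
      simp only [pvChain, pv_replace_single]
      rw [show x :: t = [x] ++ t from rfl]
      simp only [List.flatMap_append]
    have hx : pvChain [x] = pvPad x := by
      by_cases h : pvSPECIALS.contains x
      · have hm : x ∈ ['(', ')', '+', '-', '*', '/', '%', ',', '.', '<', '>', '[', ']', '"', '\'', '=', ':'] := by
          have hm0 : x ∈ pvSPECIALS := by simpa using h
          simpa [pvSPECIALS, PySem.Set.mem_ofList] using hm0
        fin_cases hm <;> decide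
      · have hne : ∀ c ∈ (pvSPECIALS : List Char), ¬ x = c := by
          intro c hc heq
          subst heq
          exact h (by simpa using hc)
        have h' : x ∉ pvSPECIALS := by simpa using h
        simp [pvChain, pv_replace_single, pvPad, h',
          hne '(' (by decide), hne ')' (by decide), hne '+' (by decide), hne '-' (by decide),
          hne '*' (by decide), hne '/' (by decide), hne '%' (by decide), hne ',' (by decide),
          hne '.' (by decide), hne '>' (by decide), hne '<' (by decide), hne '[' (by decide),
          hne ']' (by decide), hne '"' (by decide), hne '\'' (by decide), hne '=' (by decide),
          hne ':' (by decide)]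
    rw [hsplit, hx, ih]
    simp

-- split₀ of the padded string is the tokenizer
lemma pv_split_go (s : List Char) :
    ∀ (cur : List Char) (acc : List (List Char)),
      PySem.Chars.split₀.go (s.flatMap pvPad) cur acc = acc.reverse ++ pvTok s cur.reverse := by
  induction s with
  | nil =>
    intro cur acc
    by_cases h : cur.isEmpty <;>
      simp_all [PySem.Chars.split₀.go, pvTok, List.isEmpty_iff]
  | cons c t ih =>
    intro cur acc
    by_cases hs : pvSPECIALS.contains c
    · have hns := pv_spec_not_space hs
      have hsp : PySem.Chars.isspace ' ' = true := by decide
      by_cases hb : cur.isEmpty <;>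
        simp_all [pvPad, pvTok, PySem.Chars.split₀.go, List.isEmpty_iff]
    · by_cases hsp : PySem.Chars.isspace c
      · by_cases hb : cur.isEmpty <;>
          simp_all [pvPad, pvTok, PySem.Chars.split₀.go, List.isEmpty_iff]
      · simp_all [pvPad, pvTok, PySem.Chars.split₀.go]

-- B's fold realizes the tokenizer
lemma pv_foldB (s : List Char) :
    ∀ (toks : List String) (buf : List Char),
      (let st := s.foldl pvStepB (toks, buf)
       if st.2.isEmpty then st.1 else st.1 ++ [String.ofList st.2])
        = toks ++ (pvTok s buf).map String.ofList := by
  induction s with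
  | nil =>
    intro toks buf
    by_cases h : buf.isEmpty <;> simp_all [pvTok]
  | cons c t ih =>
    intro toks buf
    by_cases hs : pvSPECIALS.contains c
    · by_cases hb : buf.isEmpty <;> simp_all [pvStepB, pvTok]
    · by_cases hsp : PySem.Chars.isspace c
      · by_cases hb : buf.isEmpty <;> simp_all [pvStepB, pvTok]
      · simp_all [pvStepB, pvTok]

-- A's per-line result, moved to char lists
lemma pv_processA_toList (line : String) :
    (pvProcessA line).map String.toList = pvTok line.toList [] := by
  have hchain : (PySem.Str.replace (PySem.Str.replace (PySem.Str.replace (PySem.Str.replace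
      (PySem.Str.replace (PySem.Str.replace (PySem.Str.replace (PySem.Str.replace
      (PySem.Str.replace (PySem.Str.replace (PySem.Str.replace (PySem.Str.replace
      (PySem.Str.replace (PySem.Str.replace (PySem.Str.replace (PySem.Str.replace
      (PySem.Str.replace line "(" " ( ") ")" " ) ") "+" " + ") "-" " - ") "*" " * ")
      "/" " / ") "%" " % ") "," " , ") "." " . ") ">" " > ") "<" " < ") "[" " [ ")
      "]" " ] ") "\"" " \" ") "'" " ' ") "=" " = ") ":" " : ").toList
      = pvChain line.toList := by
    simp only [PySem.Str.toList_replace]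
    rfl
  have := PySem.Str.split₀_map_toList (PySem.Str.replace (PySem.Str.replace (PySem.Str.replace
      (PySem.Str.replace (PySem.Str.replace (PySem.Str.replace (PySem.Str.replace
      (PySem.Str.replace (PySem.Str.replace (PySem.Str.replace (PySem.Str.replace
      (PySem.Str.replace (PySem.Str.replace (PySem.Str.replace (PySem.Str.replace
      (PySem.Str.replace (PySem.Str.replace line "(" " ( ") ")" " ) ") "+" " + ")
      "-" " - ") "*" " * ") "/" " / ") "%" " % ") "," " , ") "." " . ") ">" " > ")
      "<" " < ") "[" " [ ") "]" " ] ") "\"" " \" ") "'" " ' ") "=" " = ") ":" " : ")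
  unfold pvProcessA
  rw [this, hchain, pv_chain_eq]
  have := pv_split_go line.toList [] []
  simpa [PySem.Chars.split₀] using this

-- per line, A = B
lemma pv_line_eq (line : String) : pvProcessA line = pvLineB line := by
  apply List.map_injective_iff.mpr (fun a b hab => String.toList_inj.mp hab)
  rw [pv_processA_toList]
  have hB := pv_foldB line.toList [] []
  have hLine : pvLineB line = (pvTok line.toList []).map String.ofList := by
    simpa [pvLineB] using hB
  rw [hLine]
  simp [List.map_map, Function.comp_def]

-- ===== VERDICT (by name: the statement is the Claim_ definition above) =====
theorem seperate_special_character_spec : Claim_equal_seperate_special_character := by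
  intro input_file _
  unfold Spec_seperate_special_character
  unfold seperate_special_character seperate_special_character_alt
  rw [PySem.List.foldl_append_singleton_eq_map, PySem.List.foldl_append_singleton_eq_map]
  simp [pv_line_eq]
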